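-- pv_equiv track=rewrite | github.com/SJieNg123/ZIDS | src/client/online/abp_decide.py | decide_from_rule_ids
-- ===== SOURCE A (Python) =====
-- from typing import Iterable, Dict, Tuple, List
--
-- def decide_from_rule_ids(rule_ids: Iterable[int], id_to_action: Dict[int, str]) -> Tuple[str, List[int]]:
--     """
--     ABP 優先序：命中任何 ALLOW → ALLOW；否則命中任何 BLOCK → BLOCK；否則 NOMATCH。
--     回傳 (verdict, 命中的 rule_id 列表)。
--     """
--     hits_allow: List[int] = []
--     hits_block: List[int] = []
--     for rid in rule_ids:
--         act = id_to_action.get(int(rid), "BLOCK")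
--         if act == "ALLOW":
--             hits_allow.append(int(rid))
--         elif act == "BLOCK":
--             hits_block.append(int(rid))
--     if hits_allow:
--         return "ALLOW", hits_allow
--     if hits_block:
--         return "BLOCK", hits_block
--     return "NOMATCH", []
-- ===== SOURCE B (Python) =====
-- from typing import Iterable, Dict, Tuple, List
--
-- def decide_from_rule_ids(rule_ids: Iterable[int], id_to_action: Dict[int, str]) -> Tuple[str, List[int]]:
--     # Argmax-collect scan: keep only the hits of the best priority seen so far,
--     # resetting the hit list whenever a strictly higher-priority action appears.
--     rank = {"ALLOW": 2, "BLOCK": 1}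
--     best = 0
--     hits: List[int] = []
--     for rid in rule_ids:
--         rid = int(rid)
--         r = rank.get(id_to_action.get(rid, "BLOCK"), 0)
--         if r == 0:
--             continue
--         if r > best:
--             best, hits = r, [rid]
--         elif r == best:
--             hits.append(rid)
--     verdict = "ALLOW" if best == 2 else ("BLOCK" if best == 1 else "NOMATCH")
--     return verdict, hits
-- ===== Notes on version B (the rewrite author's own statement) =====
-- stated objective: alternative
-- what changed: A partitions every id into two accumulator lists (all ALLOW hits and all BLOCK hits) and only afterwards chooses by priority; B runs an argmax-collect scan over a numeric priority, keeping a single hit list of the best priority seen so far and discarding/resetting lower-priority hits on the fly, then maps the final priority back to a verdict.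
import Mathlib
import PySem

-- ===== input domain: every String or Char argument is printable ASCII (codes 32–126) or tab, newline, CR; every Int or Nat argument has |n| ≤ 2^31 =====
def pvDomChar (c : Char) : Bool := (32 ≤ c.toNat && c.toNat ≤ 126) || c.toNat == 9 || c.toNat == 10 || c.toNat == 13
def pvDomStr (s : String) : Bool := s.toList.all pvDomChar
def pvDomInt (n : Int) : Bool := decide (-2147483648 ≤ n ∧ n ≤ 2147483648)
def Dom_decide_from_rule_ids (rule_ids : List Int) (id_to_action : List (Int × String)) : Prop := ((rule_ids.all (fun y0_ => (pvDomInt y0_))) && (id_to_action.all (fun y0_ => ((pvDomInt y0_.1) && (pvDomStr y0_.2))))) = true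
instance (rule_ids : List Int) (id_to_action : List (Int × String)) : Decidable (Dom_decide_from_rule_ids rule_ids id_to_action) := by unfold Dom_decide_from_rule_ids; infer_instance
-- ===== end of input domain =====

-- ===== PORT A =====
-- B replaces A's partition-into-two-lists-then-choose with a single argmax-collect scan over a
-- numeric priority (objective: alternative). int(rid) on an int is the identity, omitted.
-- loop body of A (classify rid, append to the matching accumulator)
def pvStepA (m : List (Int × String)) (st : List Int × List Int) (rid : Int) : List Int × List Int :=
  let act := (PySem.Dict.mk m).getD rid "BLOCK"
  if act == "ALLOW" then (st.1 ++ [rid], st.2)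
  else if act == "BLOCK" then (st.1, st.2 ++ [rid])
  else st

def decide_from_rule_ids (rule_ids : List Int) (id_to_action : List (Int × String)) : String × List Int :=
  let st := rule_ids.foldl (pvStepA id_to_action) ([], [])
  if st.1 ≠ [] then ("ALLOW", st.1)
  else if st.2 ≠ [] then ("BLOCK", st.2)
  else ("NOMATCH", [])

-- ===== PORT B =====
-- loop body of B (argmax-collect: reset on a strictly better rank, append on an equal rank)
def pvStepB (m : List (Int × String)) (st : Int × List Int) (rid : Int) : Int × List Int :=
  let r := (PySem.Dict.mk [("ALLOW", (2 : Int)), ("BLOCK", (1 : Int))]).getD ((PySem.Dict.mk m).getD rid "BLOCK") 0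
  if r == 0 then st
  else if r > st.1 then (r, [rid])
  else if r == st.1 then (st.1, st.2 ++ [rid])
  else st

def decide_from_rule_ids_alt (rule_ids : List Int) (id_to_action : List (Int × String)) : String × List Int :=
  let st := rule_ids.foldl (pvStepB id_to_action) ((0 : Int), [])
  let verdict := if st.1 == 2 then "ALLOW" else if st.1 == 1 then "BLOCK" else "NOMATCH"
  (verdict, st.2)

-- ===== PRECONDITION & SPEC =====
def Spec_decide_from_rule_ids (rule_ids : List Int) (id_to_action : List (Int × String)) (out : String × List Int) : Prop := out = decide_from_rule_ids_alt rule_ids id_to_action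
instance (rule_ids : List Int) (id_to_action : List (Int × String)) (out : String × List Int) : Decidable (Spec_decide_from_rule_ids rule_ids id_to_action out) := by unfold Spec_decide_from_rule_ids; infer_instance

-- ===== CLAIM (what is proved, stated in full; the proofs are below) =====
def Claim_equal_decide_from_rule_ids : Prop := ∀ (rule_ids : List Int) (id_to_action : List (Int × String)), Dom_decide_from_rule_ids rule_ids id_to_action → Spec_decide_from_rule_ids rule_ids id_to_action (decide_from_rule_ids rule_ids id_to_action)

-- ===== LEMMAS AND PROOFS =====

-- proof-only abbreviations: the two filters both loops amount to
def pvAct (m : List (Int × String)) (rid : Int) : String := (PySem.Dict.mk m).getD rid "BLOCK"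
def pvFA (m : List (Int × String)) (l : List Int) : List Int := l.filter (fun r => pvAct m r == "ALLOW")
def pvFB (m : List (Int × String)) (l : List Int) : List Int := l.filter (fun r => !(pvAct m r == "ALLOW") && (pvAct m r == "BLOCK"))

theorem pvRank_eval (act : String) :
    (PySem.Dict.mk [("ALLOW", (2 : Int)), ("BLOCK", (1 : Int))]).getD act 0
      = if act == "ALLOW" then 2 else if act == "BLOCK" then 1 else 0 := by
  by_cases h1 : act = "ALLOW"
  · subst h1; decide
  · by_cases h2 : act = "BLOCK"
    · subst h2; decide
    · have h1' : ¬("ALLOW" = act) := fun h => h1 h.symm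
      have h2' : ¬("BLOCK" = act) := fun h => h2 h.symm
      simp [PySem.Dict.getD, PySem.Dict.get?, h1, h2, h1', h2']

-- A's fold equals a pair of filters
theorem foldA_eq_filters (m : List (Int × String)) (l : List Int) (a b : List Int) :
    l.foldl (pvStepA m) (a, b) = (a ++ pvFA m l, b ++ pvFB m l) := by
  induction l generalizing a b with
  | nil => simp [pvFA, pvFB]
  | cons x xs ih =>
    simp only [List.foldl_cons, pvFA, pvFB, List.filter_cons]
    by_cases h : (pvAct m x == "ALLOW") = true
    · simp only [pvStepA, pvAct] at *
      simp [h, ih, pvFA, pvFB, pvAct]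
    · rw [Bool.not_eq_true] at h
      by_cases h2 : (pvAct m x == "BLOCK") = true
      · simp only [pvStepA, pvAct] at *
        simp [h, h2, ih, pvFA, pvFB, pvAct]
      · rw [Bool.not_eq_true] at h2
        simp only [pvStepA, pvAct] at *
        simp [h, h2, ih, pvFA, pvFB, pvAct]

-- B's fold from each reachable state, characterised by the same filters
theorem foldB_state2 (m : List (Int × String)) (l : List Int) (h : List Int) :
    l.foldl (pvStepB m) ((2 : Int), h) = (2, h ++ pvFA m l) := by
  induction l generalizing h with
  | nil => simp [pvFA]
  | cons x xs ih =>
    simp only [List.foldl_cons, pvFA, List.filter_cons, pvStepB, pvRank_eval]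
    by_cases hA : (((PySem.Dict.mk m).getD x "BLOCK") == "ALLOW") = true
    · simp [hA, ih, pvFA, pvAct]
    · by_cases hB : (((PySem.Dict.mk m).getD x "BLOCK") == "BLOCK") = true
      · simp [hA, hB, ih, pvFA, pvAct]
      · simp [hA, hB, ih, pvFA, pvAct]

theorem foldB_state1 (m : List (Int × String)) (l : List Int) (h : List Int) :
    l.foldl (pvStepB m) ((1 : Int), h)
      = if pvFA m l = [] then (1, h ++ pvFB m l) else (2, pvFA m l) := by
  induction l generalizing h with
  | nil => simp [pvFA, pvFB]
  | cons x xs ih =>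
    simp only [List.foldl_cons, pvFA, pvFB, List.filter_cons, pvStepB, pvRank_eval]
    by_cases hA : (((PySem.Dict.mk m).getD x "BLOCK") == "ALLOW") = true
    · simp [hA, foldB_state2, pvFA, pvAct]
    · by_cases hB : (((PySem.Dict.mk m).getD x "BLOCK") == "BLOCK") = true
      · simp [hA, hB, ih, pvFA, pvFB, pvAct]
      · simp [hA, hB, ih, pvFA, pvFB, pvAct]

theorem foldB_state0 (m : List (Int × String)) (l : List Int) :
    l.foldl (pvStepB m) ((0 : Int), [])
      = if pvFA m l = [] then (if pvFB m l = [] then (0, []) else (1, pvFB m l))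
        else (2, pvFA m l) := by
  induction l with
  | nil => simp [pvFA, pvFB]
  | cons x xs ih =>
    simp only [List.foldl_cons, pvFA, pvFB, List.filter_cons, pvStepB, pvRank_eval]
    by_cases hA : (((PySem.Dict.mk m).getD x "BLOCK") == "ALLOW") = true
    · simp [hA, foldB_state2, pvFA, pvAct]
    · by_cases hB : (((PySem.Dict.mk m).getD x "BLOCK") == "BLOCK") = true
      · simp [hA, hB, foldB_state1, pvFA, pvFB, pvAct]
      · simp [hA, hB, ih, pvFA, pvFB, pvAct]

-- ===== VERDICT (by name: the statement is the Claim_ definition above) =====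
theorem decide_from_rule_ids_spec : Claim_equal_decide_from_rule_ids := by
  intro rule_ids m _
  unfold Spec_decide_from_rule_ids decide_from_rule_ids decide_from_rule_ids_alt
  rw [foldA_eq_filters, foldB_state0]
  by_cases hA : pvFA m rule_ids = []
  · by_cases hB : pvFB m rule_ids = [] <;> simp [hA, hB]
  · simp [hA]
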